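-- pv_equiv track=rewrite | github.com/Musadalancikar/Codeforces-Python | 1348A-PhoenixandBalance.py | phoenix
-- ===== SOURCE A (Python) =====
-- def phoenix(n):
--     lst = [2**j for j in range(1, n+1)]
--     lst_1 = []
--     lst_2 = []
--     if len(lst) == 2:
--         return abs(lst[0]-lst[-1])
--     else:
--         for k in range(int(len(lst)/2)):
--             lst_1.append(lst[-1+k])
--
--         for m in lst:
--             if m not in lst_1:
--                 lst_2.append(m)
--
--         return abs(sum(lst_1) - sum(lst_2))
-- ===== SOURCE B (Python) =====
-- def phoenix(n):
--     # Closed form: the split takes the largest coin 2**n plus the n//2 - 1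
--     # smallest coins; the absolute difference telescopes to 2**(n//2 + 1) - 2.
--     if n < 1:
--         return 0
--     if n == 1:
--         return 2
--     return 2 ** (n // 2 + 1) - 2
-- ===== Notes on version B (the rewrite author's own statement) =====
-- stated objective: faster
-- what changed: Replaced A's list materialisation, quadratic membership filter and summations by a closed-form power-of-two formula (with the two trivial small cases).
import Mathlib
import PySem

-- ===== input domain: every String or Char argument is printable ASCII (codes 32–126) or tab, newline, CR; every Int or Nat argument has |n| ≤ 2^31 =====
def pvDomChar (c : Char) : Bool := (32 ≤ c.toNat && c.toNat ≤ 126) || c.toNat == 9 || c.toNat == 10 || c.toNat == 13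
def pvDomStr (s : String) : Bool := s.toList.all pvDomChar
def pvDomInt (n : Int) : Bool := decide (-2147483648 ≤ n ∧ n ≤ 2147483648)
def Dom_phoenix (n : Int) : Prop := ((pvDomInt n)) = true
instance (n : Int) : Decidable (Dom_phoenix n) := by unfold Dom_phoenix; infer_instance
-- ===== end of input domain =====

-- B replaces A's list building, quadratic membership filtering and summations by a closed-form formula.

-- ===== PORT A =====
-- 2**j: the exponent j is ≥ 1 in every iteration, so j.toNat is exact.
-- int(len(lst)/2): len ≤ 2^31 < 2^53, so the float division is exact and equals Nat division.
-- lst[...] indices are always in range where evaluated (Python never raises), so pyGetD's default 0 is never used.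
def phoenix (n : Int) : Int :=
  let lst := (PySem.List.pyRange 1 (n + 1) 1).map (fun j => (2 : Int) ^ j.toNat)
  if lst.length == 2 then
    |PySem.List.pyGetD lst 0 0 - PySem.List.pyGetD lst (-1) 0|
  else
    let lst1 := (PySem.List.pyRange 0 ((lst.length / 2 : Nat) : Int) 1).foldl
      (fun acc k => acc ++ [PySem.List.pyGetD lst (-1 + k) 0]) []
    let lst2 := lst.foldl (fun acc m => if m ∈ lst1 then acc else acc ++ [m]) []
    |lst1.sum - lst2.sum|

-- ===== PORT B =====
def phoenix_alt (n : Int) : Int :=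
  if n < 1 then 0
  else if n = 1 then 2
  else 2 ^ (PySem.Int.floordiv n 2 + 1).toNat - 2


-- ===== PRECONDITION & SPEC =====
def Spec_phoenix (n : Int) (out : Int) : Prop := out = phoenix_alt n
instance (n : Int) (out : Int) : Decidable (Spec_phoenix n out) := by unfold Spec_phoenix; infer_instance

-- ===== CLAIM (what is proved, stated in full; the proofs are below) =====
def Claim_equal_phoenix : Prop := ∀ (n : Int), Dom_phoenix n → Spec_phoenix n (phoenix n)

-- ===== LEMMAS AND PROOFS =====

theorem pv_two_pow_inj {a b : Nat} (h : (2 : Int) ^ a = 2 ^ b) : a = b := by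
  have h2 : ((2 ^ a : Nat) : Int) = ((2 ^ b : Nat) : Int) := by push_cast; exact_mod_cast h
  exact Nat.pow_right_injective (le_refl 2) (Nat.cast_injective h2)

theorem pv_sumpow (t a : Nat) :
    (((List.range' a t).map (fun j => (2 : Int) ^ (j + 1))).sum) = 2 ^ (a + t + 1) - 2 ^ (a + 1) := by
  induction t generalizing a with
  | zero => simp
  | succ t ih =>
      rw [List.range'_succ]
      simp only [List.map_cons, List.sum_cons, ih (a + 1)]
      have h : a + (t + 1) + 1 = (a + 1) + t + 1 := by omega
      rw [h]
      ring

theorem pv_lst_eq (m : Nat) :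
    (PySem.List.pyRange 1 ((m : Int) + 1) 1).map (fun j => (2 : Int) ^ j.toNat)
      = (List.range m).map (fun k => (2 : Int) ^ (k + 1)) := by
  rw [PySem.List.pyRange_one]
  have h : ((m : Int) + 1 - 1).toNat = m := by omega
  rw [h, List.map_map]
  apply List.map_congr_left
  intro k _
  simp only [Function.comp]
  congr 1
  omega

theorem pv_lst1 (M : Nat) (hM : 3 ≤ M) :
    (PySem.List.pyRange 0 ((M / 2 : Nat) : Int) 1).foldl
        (fun acc k => acc ++ [PySem.List.pyGetD ((List.range M).map (fun k => (2:Int)^(k+1))) (-1 + k) 0]) []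
    = (2:Int)^M :: (List.range (M/2 - 1)).map (fun s => (2:Int)^(s+1)) := by
  rw [PySem.List.foldl_append_singleton_eq_map, List.nil_append, PySem.List.pyRange_one]
  have h0 : (((M/2 : Nat) : Int) - 0).toNat = M/2 := by omega
  rw [h0, List.map_map]
  have hsucc : M/2 = (M/2 - 1) + 1 := by omega
  rw [hsucc, List.range_succ_eq_map]
  simp only [Nat.add_sub_cancel]
  simp only [List.map_cons, List.map_map, Function.comp]
  have hlen : ((List.range M).map (fun k => (2:Int)^(k+1))).length = M := by simp
  congr 1
  · have e1 : (0 : Int) + ((0:Nat) : Int) = 0 := by norm_num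
    norm_num
    rw [PySem.List.pyGetD_neg_ofNat _ 1 0 (by omega) (by rw [hlen]; omega)]
    simp only [hlen, List.getElem_map, List.getElem_range]
    congr 1
    omega
  · apply List.map_congr_left
    intro s hs
    have hsM : s < M := by
      have := List.mem_range.mp hs; omega
    simp only [Function.comp_apply, Nat.succ_eq_add_one]
    have e : (-1 : Int) + (0 + ((s+1 : Nat) : Int)) = ((s : Nat) : Int) := by push_cast; ring
    rw [e, PySem.List.pyGetD_natCast]
    rw [List.getD_eq_getElem _ _ (by simpa using hsM)]
    simp

theorem pv_mem_head (M : Nat) :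
    (2:Int)^M ∈ ((2:Int)^M :: (List.range (M/2 - 1)).map (fun s => (2:Int)^(s+1))) :=
  List.mem_cons_self

theorem pv_mem_small (M j : Nat) (hj : j < M/2 - 1) :
    (2:Int)^(j+1) ∈ ((2:Int)^M :: (List.range (M/2 - 1)).map (fun s => (2:Int)^(s+1))) := by
  exact List.mem_cons_of_mem _ (List.mem_map.mpr ⟨j, List.mem_range.mpr hj, rfl⟩)

theorem pv_not_mem_mid (M j : Nat) (hj1 : M/2 - 1 ≤ j) (hj2 : j < M - 1) :
    (2:Int)^(j+1) ∉ ((2:Int)^M :: (List.range (M/2 - 1)).map (fun s => (2:Int)^(s+1))) := by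
  intro hmem
  rcases List.mem_cons.mp hmem with h | h
  · have := pv_two_pow_inj h; omega
  · rcases List.mem_map.mp h with ⟨s, hs, hsq⟩
    have hs' := List.mem_range.mp hs
    have := pv_two_pow_inj hsq.symm
    omega

theorem pv_lst2 (M : Nat) (hM : 3 ≤ M) :
    ((List.range M).map (fun k => (2:Int)^(k+1))).foldl
        (fun acc m => if m ∈ ((2:Int)^M :: (List.range (M/2 - 1)).map (fun s => (2:Int)^(s+1))) then acc
                      else acc ++ [m]) []
    = (List.range' (M/2 - 1) (M - 1 - (M/2 - 1))).map (fun k => (2:Int)^(k+1)) := by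
  have hfun : (fun (acc : List Int) m => if m ∈ ((2:Int)^M :: (List.range (M/2 - 1)).map (fun s => (2:Int)^(s+1))) then acc else acc ++ [m])
      = (fun acc m => if m ∉ ((2:Int)^M :: (List.range (M/2 - 1)).map (fun s => (2:Int)^(s+1))) then acc ++ [id m] else acc) := by
    funext acc m
    rw [ite_not]
    rfl
  rw [hfun, PySem.List.foldl_append_ite, List.nil_append]
  have happ : ∀ (s m n : Nat), List.range' s m ++ List.range' (s + m) n = List.range' s (m + n) := by
    intro s m n
    simpa using List.range'_append (s := s) (m := m) (n := n) (step := 1)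
  have hsplit : List.range M = (List.range' 0 (M/2 - 1)) ++ ((List.range' (M/2 - 1) (M - 1 - (M/2 - 1))) ++ (List.range' ((M/2 - 1) + (M - 1 - (M/2 - 1))) 1)) := by
    have h1 := happ 0 (M/2 - 1) ((M - 1 - (M/2 - 1)) + 1)
    rw [Nat.zero_add] at h1
    rw [happ, h1, List.range_eq_range']
    congr 1
    omega
  rw [hsplit, List.map_append, List.map_append, List.filter_append, List.filter_append]
  rw [List.filter_eq_nil_iff.mpr (by
        intro a ha
        rcases List.mem_map.mp ha with ⟨j, hj, rfl⟩
        have hj' := List.mem_range'_1.mp hj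
        simp only [decide_eq_true_eq, Decidable.not_not]
        exact pv_mem_small M j (by omega))]
  rw [List.filter_eq_self.mpr (by
        intro a ha
        rcases List.mem_map.mp ha with ⟨j, hj, rfl⟩
        have hj' := List.mem_range'_1.mp hj
        simp only [decide_eq_true_eq]
        exact pv_not_mem_mid M j (by omega) (by omega))]
  rw [List.filter_eq_nil_iff.mpr (by
        intro a ha
        rcases List.mem_map.mp ha with ⟨j, hj, rfl⟩
        have hj' := List.mem_range'_1.mp hj
        simp only [decide_eq_true_eq, Decidable.not_not]
        have hM2 : M/2 - 1 + (M - 1 - (M/2 - 1)) = M - 1 := by omega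
        have : j = M - 1 := by omega
        subst this
        rw [show M - 1 + 1 = M by omega]
        exact pv_mem_head M)]
  simp

theorem pv_fd (m : Nat) : (PySem.Int.floordiv (m:Int) 2 + 1).toNat = m/2 + 1 := by
  simp [PySem.Int.floordiv, Int.fdiv_eq_ediv]
  omega

theorem phoenix_eq_alt (n : Int) : phoenix n = phoenix_alt n := by
  rcases lt_or_ge n 1 with hlt | hge
  · unfold phoenix phoenix_alt
    rw [PySem.List.pyRange_one_eq_nil (by omega)]
    simp [hlt]
  · obtain ⟨m, rfl⟩ : ∃ m : Nat, n = (m:Int) := ⟨n.toNat, by omega⟩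
    have hm1 : 1 ≤ m := by omega
    match m, hm1 with
    | 1, _ => decide
    | 2, _ => decide
    | (M+3), _ =>
      have hM : 3 ≤ M+3 := by omega
      unfold phoenix
      dsimp only
      rw [pv_lst_eq (M+3)]
      simp only [List.length_map, List.length_range]
      have hne : ((M+3) == 2) = false := by simp
      rw [hne]
      simp only [Bool.false_eq_true, if_false]
      rw [pv_lst1 (M+3) hM, pv_lst2 (M+3) hM]
      rw [List.sum_cons, List.range_eq_range', pv_sumpow, pv_sumpow]
      have h1 : 1 ≤ (M+3)/2 := by omega
      have e1 : 0 + ((M+3)/2 - 1) + 1 = (M+3)/2 := by omega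
      have e2 : ((M+3)/2 - 1) + ((M+3) - 1 - ((M+3)/2 - 1)) + 1 = M+3 := by omega
      have e3 : ((M+3)/2 - 1) + 1 = (M+3)/2 := by omega
      rw [e1, e2, e3]
      unfold phoenix_alt
      rw [if_neg (by omega), if_neg (by omega), pv_fd]
      have hpos : (1:Int) ≤ 2^((M+3)/2) := one_le_pow₀ (by norm_num)
      rw [show (0:Nat)+1 = 1 from rfl]
      rw [abs_of_nonneg (by simp only [pow_one]; linarith)]
      rw [pow_succ]
      ring

-- ===== VERDICT (by name: the statement is the Claim_ definition above) =====
theorem phoenix_spec : Claim_equal_phoenix := by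
  intro n _
  exact phoenix_eq_alt n
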